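-- pv_equiv track=rewrite | github.com/mo9mo9-uwu-mo9mo9/Kumihan-Formatter | tests/load/test_large_file_processing.py | generate_large_content
-- ===== SOURCE A (Python) =====
-- def generate_large_content(size_mb: int) -> str:
--     """大型コンテンツを生成"""
--     content_parts = []
--
--     # 基本的な記法パターン
--     patterns = [
--         "# 見出し1 #セクション{}##",
--         "## 見出し2 ##サブセクション{}###",
--         "# 太字 #重要なテキスト{}##",
--         "# イタリック #強調テキスト{}##",
--         "- リストアイテム{}",
--         "  - ネストされたアイテム{}",
--         "通常のテキスト行{}。これはサンプルテキストです。",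
--         "# 枠線 #枠内のコンテンツ{}##",
--     ]
--
--     # 目標サイズに達するまでコンテンツを生成
--     line_count = 0
--     estimated_bytes = 0
--     target_bytes = size_mb * 1024 * 1024
--
--     while estimated_bytes < target_bytes:
--         for pattern in patterns:
--             line = pattern.format(line_count)
--             content_parts.append(line)
--             estimated_bytes += len(line.encode("utf-8"))
--             line_count += 1
--
--             if estimated_bytes >= target_bytes:
--                 break
--
--     return "\n".join(content_parts)
-- ===== SOURCE B (Python) =====
-- def generate_large_content(size_mb: int) -> str:
--     """大型コンテンツを生成"""
--     # The eight notation patterns, pre-split around the '{}' placeholder.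
--     splits = [
--         ("# 見出し1 #セクション", "##"),
--         ("## 見出し2 ##サブセクション", "###"),
--         ("# 太字 #重要なテキスト", "##"),
--         ("# イタリック #強調テキスト", "##"),
--         ("- リストアイテム", ""),
--         ("  - ネストされたアイテム", ""),
--         ("通常のテキスト行", "。これはサンプルテキストです。"),
--         ("# 枠線 #枠内のコンテンツ", "##"),
--     ]
--     # Constant UTF-8 bytes of each pattern (everything except the inserted number).
--     base = [len((pre + suf).encode("utf-8")) for pre, suf in splits]
--     target = size_mb * 1024 * 1024
--
--     # Phase 1: pure arithmetic — determine how many lines are needed.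
--     # Line k contributes base[k % 8] bytes plus one byte per decimal digit of k.
--     n = 0
--     total = 0
--     while total < target:
--         total += base[n % 8] + len(str(n))
--         n += 1
--
--     # Phase 2: build exactly those n lines.
--     lines = []
--     for k in range(n):
--         pre, suf = splits[k % 8]
--         lines.append(pre + str(k) + suf)
--     return "\n".join(lines)
-- ===== Notes on version B (the rewrite author's own statement) =====
-- stated objective: alternative
-- what changed: A's nested while/for-with-break that appends each formatted line and measures its UTF-8 encoding is replaced by two phases: an arithmetic counting loop (constant byte cost per pattern plus the digit count of the line number) that determines the exact number of lines, followed by a direct build of those lines from pre-split (prefix, suffix) pattern pairs.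
import Mathlib
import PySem

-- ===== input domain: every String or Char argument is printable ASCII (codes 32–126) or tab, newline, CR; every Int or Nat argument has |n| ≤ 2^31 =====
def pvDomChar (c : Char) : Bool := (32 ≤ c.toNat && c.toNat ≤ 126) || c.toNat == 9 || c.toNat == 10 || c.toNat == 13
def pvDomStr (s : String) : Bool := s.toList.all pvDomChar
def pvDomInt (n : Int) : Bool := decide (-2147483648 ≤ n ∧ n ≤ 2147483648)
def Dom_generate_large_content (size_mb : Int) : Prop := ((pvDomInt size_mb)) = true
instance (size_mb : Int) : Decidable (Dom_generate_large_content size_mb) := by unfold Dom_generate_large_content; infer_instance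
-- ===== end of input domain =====

-- B replaces A's accumulate-and-measure loop by two phases: an arithmetic loop that only
-- counts bytes to find the number of lines, then a direct build of exactly those lines
-- (objective: alternative decomposition of the same generation task).

-- ===== PORT A =====

-- len(s.encode("utf-8")): exact — Python's UTF-8 byte count is the sum of the
-- per-codepoint UTF-8 sizes, which is Char.utf8Size.
def pyUtf8Len (cs : List Char) : Nat := (cs.map Char.utf8Size).sum

-- pattern.format(x): exact for a format string containing exactly one '{}' and no
-- other braces (true of every pattern below) — the placeholder is replaced by the
-- rendered argument.
def pyFormat1 : List Char → List Char → List Char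
  | '{' :: '}' :: rest, ins => ins ++ rest
  | c :: rest, ins => c :: pyFormat1 rest ins
  | [], _ => []

def pvPatterns : List String :=
  [ "# 見出し1 #セクション{}##",
    "## 見出し2 ##サブセクション{}###",
    "# 太字 #重要なテキスト{}##",
    "# イタリック #強調テキスト{}##",
    "- リストアイテム{}",
    "  - ネストされたアイテム{}",
    "通常のテキスト行{}。これはサンプルテキストです。",
    "# 枠線 #枠内のコンテンツ{}##" ]

-- line = pattern.format(line_count)
def pvLineA (p : String) (k : Nat) : List Char := pyFormat1 p.toList (PySem.Int.toChars (k : Int))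

-- the inner `for pattern in patterns: … if estimated_bytes >= target_bytes: break`
def pvInnerA (target : Int) : List String → List (List Char) → Nat → Int → (List (List Char) × Nat × Int)
  | [], parts, k, est => (parts, k, est)
  | p :: rest, parts, k, est =>
    let line := pvLineA p k
    let parts' := parts ++ [line]
    let est' := est + (pyUtf8Len line : Int)
    if target ≤ est' then (parts', k + 1, est') else pvInnerA target rest parts' (k + 1) est'

-- termination helper for the outer while loop: every generated line has ≥ 1 byte
theorem pyUtf8Len_pos (cs : List Char) (h : cs ≠ []) : 1 ≤ pyUtf8Len cs := by
  cases cs with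
  | nil => exact absurd rfl h
  | cons c cs =>
    have := Char.utf8Size_pos c
    simp [pyUtf8Len]
    omega

theorem pvInnerA_est_le (target : Int) : ∀ (ps : List String) (parts : List (List Char)) (k : Nat) (est : Int),
    est ≤ (pvInnerA target ps parts k est).2.2 := by
  intro ps
  induction ps with
  | nil => intro parts k est; simp [pvInnerA]
  | cons p rest ih =>
    intro parts k est
    rw [pvInnerA]
    split
    · simp
    · exact le_trans (by omega) (ih _ _ _)

theorem pvInnerA_patterns_lt (target : Int) (parts : List (List Char)) (k : Nat) (est : Int) :
    est + 1 ≤ (pvInnerA target pvPatterns parts k est).2.2 := by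
  have hdec : pvLineA "# 見出し1 #セクション{}##" k
      = "# 見出し1 #セクション".toList ++ PySem.Int.toChars (k : Int) ++ "##".toList := rfl
  have h1 : 1 ≤ pyUtf8Len (pvLineA "# 見出し1 #セクション{}##" k) := by
    rw [hdec]
    apply pyUtf8Len_pos
    apply List.append_ne_nil_of_left_ne_nil
    apply List.append_ne_nil_of_left_ne_nil
    decide
  rw [pvPatterns, pvInnerA]
  split
  · simp only
    omega
  · exact le_trans (by omega) (pvInnerA_est_le target _ _ _ _)

-- the outer `while estimated_bytes < target_bytes:` loop
def pvOuterA (target : Int) (parts : List (List Char)) (k : Nat) (est : Int) : List (List Char) :=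
  if est < target then
    let r := pvInnerA target pvPatterns parts k est
    pvOuterA target r.1 r.2.1 r.2.2
  else parts
termination_by (target - est).toNat
decreasing_by
  have := pvInnerA_patterns_lt target parts k est
  omega

def generate_large_content (size_mb : Int) : String :=
  let target := size_mb * 1024 * 1024
  String.mk (PySem.Chars.join ['\n'] (pvOuterA target [] 0 0))

-- ===== PORT B =====

-- the eight patterns pre-split around the '{}' placeholder
def pvSplits : List (String × String) :=
  [ ("# 見出し1 #セクション", "##"),
    ("## 見出し2 ##サブセクション", "###"),
    ("# 太字 #重要なテキスト", "##"),
    ("# イタリック #強調テキスト", "##"),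
    ("- リストアイテム", ""),
    ("  - ネストされたアイテム", ""),
    ("通常のテキスト行", "。これはサンプルテキストです。"),
    ("# 枠線 #枠内のコンテンツ", "##") ]

-- base = [len((pre + suf).encode("utf-8")) for pre, suf in splits]
def pvBase : List Nat := pvSplits.map (fun ps => pyUtf8Len (ps.1.toList ++ ps.2.toList))

-- termination helper for the counting loop: every base entry is positive
theorem pvBase_pos : ∀ j, j < 8 → 1 ≤ pvBase.getD j 0 := by decide

-- phase 1: `while total < target: total += base[n % 8] + len(str(n)); n += 1`
def pvCount (target : Int) (total : Int) (n : Nat) : Nat :=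
  if total < target then
    pvCount target (total + (pvBase.getD (n % 8) 0 : Int) + ((PySem.Int.toChars (n : Int)).length : Int)) (n + 1)
  else n
termination_by (target - total).toNat
decreasing_by
  have := pvBase_pos (n % 8) (Nat.mod_lt n (by omega))
  omega

-- phase 2 loop body: pre + str(k) + suf
def pvLineB (k : Nat) : List Char :=
  let ps := pvSplits.getD (k % 8) ("", "")
  ps.1.toList ++ PySem.Int.toChars (k : Int) ++ ps.2.toList

def generate_large_content_alt (size_mb : Int) : String :=
  let target := size_mb * 1024 * 1024
  let n := pvCount target 0 0
  String.mk (PySem.Chars.join ['\n'] ((List.range n).map pvLineB))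

-- ===== PRECONDITION & SPEC =====
def Spec_generate_large_content (size_mb : Int) (out : String) : Prop := out = generate_large_content_alt size_mb
instance (size_mb : Int) (out : String) : Decidable (Spec_generate_large_content size_mb out) := by unfold Spec_generate_large_content; infer_instance

-- ===== CLAIM (what is proved, stated in full; the proofs are below) =====
def Claim_equal_generate_large_content : Prop := ∀ (size_mb : Int), Dom_generate_large_content size_mb → Spec_generate_large_content size_mb (generate_large_content size_mb)

-- ===== LEMMAS AND PROOFS =====

-- all characters produced by Nat.toDigits 10 are ASCII (so 1 UTF-8 byte each)
theorem pvDigitChar_val (m : Nat) : (Nat.digitChar m).val ≤ 127 := by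
  rcases Nat.lt_or_ge m 16 with h | h
  · interval_cases m <;> decide
  · simp only [Nat.digitChar]
    repeat rw [if_neg (by omega)]
    decide

theorem pvCore_ascii (f : Nat) : ∀ (n : Nat) (ds : List Char), (∀ c ∈ ds, c.val ≤ 127) →
    ∀ c ∈ Nat.toDigitsCore 10 f n ds, c.val ≤ 127 := by
  induction f with
  | zero => intro n ds h c hc; rw [Nat.toDigitsCore] at hc; exact h c hc
  | succ f ih =>
    intro n ds h c hc
    rw [Nat.toDigitsCore] at hc
    split at hc
    · rw [List.mem_cons] at hc
      rcases hc with hc | hc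
      · exact hc ▸ pvDigitChar_val _
      · exact h c hc
    · refine ih _ _ (fun c' hc' => ?_) c hc
      rw [List.mem_cons] at hc'
      rcases hc' with h1 | h1
      · exact h1 ▸ pvDigitChar_val _
      · exact h c' h1

theorem pvCore_len (f : Nat) : ∀ (n : Nat) (ds : List Char),
    ds.length ≤ (Nat.toDigitsCore 10 f n ds).length := by
  induction f with
  | zero => intro n ds; rw [Nat.toDigitsCore]
  | succ f ih =>
    intro n ds
    rw [Nat.toDigitsCore]
    split
    · simp
    · exact le_trans (by simp) (ih _ _)

theorem pvToDigits_ne_nil (n : Nat) : Nat.toDigits 10 n ≠ [] := by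
  unfold Nat.toDigits
  rw [Nat.toDigitsCore]
  split
  · simp
  · intro h
    have := pvCore_len n (n / 10) [(n % 10).digitChar]
    rw [h] at this; simp at this

theorem pvToChars_nat (k : Nat) : PySem.Int.toChars (k : Int) = Nat.toDigits 10 k := by
  simp [PySem.Int.toChars]

theorem pvUtf8_one (c : Char) (h : c.val ≤ 127) : c.utf8Size = 1 := by
  simp [Char.utf8Size, h]

theorem pvUtf8Len_ascii (cs : List Char) (h : ∀ c ∈ cs, c.val ≤ 127) :
    pyUtf8Len cs = cs.length := by
  induction cs with
  | nil => rfl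
  | cons c cs ih =>
    have h1 : c.utf8Size = 1 := pvUtf8_one c (h c (by simp))
    simp [pyUtf8Len] at ih ⊢
    rw [h1, ih (fun c' hc' => h c' (by simp [hc']))]
    omega

theorem pvUtf8Len_append (a b : List Char) : pyUtf8Len (a ++ b) = pyUtf8Len a + pyUtf8Len b := by
  simp [pyUtf8Len]

theorem pvToChars_ne_nil (k : Nat) : PySem.Int.toChars (k : Int) ≠ [] := by
  rw [pvToChars_nat]; exact pvToDigits_ne_nil k

theorem pvLineB_pos (k : Nat) : 1 ≤ pyUtf8Len (pvLineB k) := by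
  unfold pvLineB
  rw [pvUtf8Len_append, pvUtf8Len_append]
  have := pyUtf8Len_pos _ (pvToChars_ne_nil k)
  omega

-- the canonical flat line generator both loops compute
def pvGen (target : Int) (k : Nat) (est : Int) : List (List Char) :=
  if est < target then pvLineB k :: pvGen target (k + 1) (est + (pyUtf8Len (pvLineB k) : Int)) else []
termination_by (target - est).toNat
decreasing_by
  have := pvLineB_pos k
  omega

-- per-pattern: A's format call produces exactly B's pre ++ digits ++ suf
set_option maxHeartbeats 1000000 in
theorem pvFormat_split (j : Nat) (hj : j < 8) (ins : List Char) :
    pyFormat1 ((pvPatterns.getD j "").toList) ins =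
      (pvSplits.getD j ("", "")).1.toList ++ ins ++ (pvSplits.getD j ("", "")).2.toList := by
  interval_cases j <;> rfl

theorem pvLineA_eq (j k : Nat) (hj : j < 8) (hk : k % 8 = j) :
    pvLineA (pvPatterns.getD j "") k = pvLineB k := by
  unfold pvLineA pvLineB
  rw [hk, pvFormat_split j hj]

-- B's arithmetic byte count per line equals the UTF-8 length of the line
theorem pvBEq (k : Nat) :
    pvBase.getD (k % 8) 0 + (PySem.Int.toChars (k : Int)).length = pyUtf8Len (pvLineB k) := by
  have hdig : pyUtf8Len (PySem.Int.toChars (k : Int)) = (PySem.Int.toChars (k : Int)).length := by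
    apply pvUtf8Len_ascii
    rw [pvToChars_nat]
    exact pvCore_ascii (k + 1) k [] (by simp)
  have hj : k % 8 < 8 := Nat.mod_lt k (by omega)
  unfold pvLineB
  rw [pvUtf8Len_append, pvUtf8Len_append, hdig]
  have hbase : pvBase.getD (k % 8) 0 =
      pyUtf8Len ((pvSplits.getD (k % 8) ("", "")).1.toList) +
      pyUtf8Len ((pvSplits.getD (k % 8) ("", "")).2.toList) := by
    have h8 : k % 8 = 0 ∨ k % 8 = 1 ∨ k % 8 = 2 ∨ k % 8 = 3 ∨ k % 8 = 4 ∨ k % 8 = 5 ∨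
        k % 8 = 6 ∨ k % 8 = 7 := by omega
    rcases h8 with h | h | h | h | h | h | h | h <;> rw [h] <;> decide
  omega

theorem pvPatterns_drop (j : Nat) (hj : j < 8) :
    pvPatterns.drop j = (pvPatterns.getD j "") :: pvPatterns.drop (j + 1) := by
  interval_cases j <;> rfl

-- A's nested loops compute the canonical generator
theorem pvA_gen (target : Int) : ∀ (N : Nat) (est : Int), (target - est).toNat ≤ N →
    ∀ (j k : Nat) (parts : List (List Char)), j < 8 → k % 8 = j → est < target →
    (pvOuterA target
      (pvInnerA target (pvPatterns.drop j) parts k est).1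
      (pvInnerA target (pvPatterns.drop j) parts k est).2.1
      (pvInnerA target (pvPatterns.drop j) parts k est).2.2) = parts ++ pvGen target k est := by
  intro N
  induction N with
  | zero => intro est hN j k parts hj hk hlt; omega
  | succ N ih =>
    intro est hN j k parts hj hk hlt
    rw [pvPatterns_drop j hj, pvInnerA]
    have hline := pvLineA_eq j k hj hk
    have hpos := pvLineB_pos k
    rw [hline]
    by_cases hbr : target ≤ est + (pyUtf8Len (pvLineB k) : Int)
    · rw [if_pos hbr]
      simp only
      rw [pvOuterA, if_neg (by omega)]
      conv_rhs => rw [pvGen, if_pos hlt, pvGen, if_neg (by omega)]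
    · rw [if_neg hbr]
      have hlt' : est + (pyUtf8Len (pvLineB k) : Int) < target := by omega
      have hN' : (target - (est + (pyUtf8Len (pvLineB k) : Int))).toNat ≤ N := by omega
      by_cases hj7 : j = 7
      · subst hj7
        have hdrop8 : pvPatterns.drop 8 = [] := rfl
        rw [hdrop8, pvInnerA]
        simp only
        rw [pvOuterA, if_pos hlt']
        have hk1 : (k + 1) % 8 = 0 := by omega
        have := ih _ hN' 0 (k + 1) (parts ++ [pvLineB k]) (by omega) hk1 hlt'
        rw [List.drop_zero] at this
        rw [this]
        conv_rhs => rw [pvGen, if_pos hlt]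
        simp
      · have hk1 : (k + 1) % 8 = j + 1 := by omega
        have := ih _ hN' (j + 1) (k + 1) (parts ++ [pvLineB k]) (by omega) hk1 hlt'
        rw [this]
        conv_rhs => rw [pvGen, if_pos hlt]
        simp

-- B's counting loop also computes the canonical generator
theorem pvB_gen (target : Int) : ∀ (N : Nat) (est : Int), (target - est).toNat ≤ N → ∀ (k : Nat),
    (List.range (pvCount target est k)).map pvLineB =
      (List.range k).map pvLineB ++ pvGen target k est := by
  intro N
  induction N with
  | zero =>
    intro est hN k
    rw [pvCount, pvGen]
    have : ¬ est < target := by omega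
    rw [if_neg this, if_neg this]
    simp
  | succ N ih =>
    intro est hN k
    rw [pvCount, pvGen]
    by_cases hlt : est < target
    · rw [if_pos hlt, if_pos hlt]
      have hbe := pvBEq k
      have hbp := pvBase_pos (k % 8) (Nat.mod_lt k (by omega))
      have harith : est + (pvBase.getD (k % 8) 0 : Int) + ((PySem.Int.toChars (k : Int)).length : Int)
          = est + (pyUtf8Len (pvLineB k) : Int) := by
        omega
      rw [harith]
      have hN' : (target - (est + (pyUtf8Len (pvLineB k) : Int))).toNat ≤ N := by
        have := pvLineB_pos k
        omega
      rw [ih _ hN' (k + 1), List.range_succ]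
      simp
    · rw [if_neg hlt, if_neg hlt]
      simp

-- ===== VERDICT (by name: the statement is the Claim_ definition above) =====
theorem generate_large_content_spec : Claim_equal_generate_large_content := by
  unfold Claim_equal_generate_large_content
  intro size_mb _
  unfold Spec_generate_large_content generate_large_content generate_large_content_alt
  simp only
  congr 1
  congr 1
  set target := size_mb * 1024 * 1024 with htarget
  by_cases h0 : (0 : Int) < target
  · have hA : pvOuterA target [] 0 0 = [] ++ pvGen target 0 0 := by
      rw [pvOuterA, if_pos h0]
      have := pvA_gen target (target - 0).toNat 0 (by omega) 0 0 [] (by omega) (by omega) h0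
      rw [List.drop_zero] at this
      exact this
    have hB := pvB_gen target (target - 0).toNat 0 (by omega) 0
    rw [hA, hB]
    simp
  · rw [pvOuterA, if_neg h0, pvCount, if_neg h0]
    simp
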